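-- pv_equiv track=rewrite | github.com/naveen1600/n-gram-model | main.py | generate_bigrams
-- ===== SOURCE A (Python) =====
-- def generate_bigrams(data):
--     bigrams = []
--     total_bigrams = 0
--     previousWord = None
--     for currentWord in data:
--         if previousWord is not None and currentWord != '<s>':
--             bigram = previousWord + ' ' + currentWord
--             total_bigrams += 1
--             bigrams.append(bigram)
--         previousWord = currentWord
--     return bigrams, total_bigrams
-- ===== SOURCE B (Python) =====
-- def generate_bigrams(data):
--     # Stage 1: split the stream into sentence segments, each '<s>' starting a new segment.
--     segments = []
--     cur = []
--     for w in data: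
--         if w == '<s>' and cur:
--             segments.append(cur)
--             cur = [w]
--         else:
--             cur.append(w)
--     if cur:
--         segments.append(cur)
--     # Stage 2: within each segment, join consecutive words; concatenate across segments.
--     bigrams = []
--     for seg in segments:
--         bigrams.extend(a + ' ' + b for a, b in zip(seg, seg[1:]))
--     return bigrams, len(bigrams)
-- ===== Notes on version B (the rewrite author's own statement) =====
-- stated objective: alternative
-- what changed: B first splits the token stream into sentence segments (each '<s>' starting a new segment) and then emits the consecutive-word joins within each segment, instead of A's single stateful pass threading previousWord and skipping at '<s>'.
import Mathlib
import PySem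

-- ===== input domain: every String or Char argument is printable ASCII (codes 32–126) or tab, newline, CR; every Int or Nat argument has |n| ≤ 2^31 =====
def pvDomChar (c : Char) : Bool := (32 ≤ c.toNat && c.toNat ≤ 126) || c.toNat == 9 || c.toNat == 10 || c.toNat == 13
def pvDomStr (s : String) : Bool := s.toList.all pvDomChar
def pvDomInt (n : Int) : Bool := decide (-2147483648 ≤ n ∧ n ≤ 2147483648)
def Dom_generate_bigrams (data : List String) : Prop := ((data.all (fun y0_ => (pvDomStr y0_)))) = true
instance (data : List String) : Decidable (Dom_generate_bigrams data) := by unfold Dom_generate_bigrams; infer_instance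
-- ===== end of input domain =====

-- B restructures A's single stateful previousWord pass into two stages: split the stream
-- into sentence segments at each '<s>', then join consecutive words within each segment.

-- ===== PORT A =====
-- state: (bigrams, total_bigrams, previousWord)
def generate_bigrams_step (st : List String × Int × Option String) (currentWord : String) :
    List String × Int × Option String :=
  match st.2.2 with
  | some previousWord =>
      if currentWord ≠ "<s>" then
        (st.1 ++ [previousWord ++ " " ++ currentWord], st.2.1 + 1, some currentWord)
      else (st.1, st.2.1, some currentWord)
  | none => (st.1, st.2.1, some currentWord)

def generate_bigrams (data : List String) : List String × Int :=
  let st := data.foldl generate_bigrams_step ([], 0, none)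
  (st.1, st.2.1)

-- ===== PORT B =====
-- Stage-1 loop state: (segments, cur)
def generate_bigrams_alt_split (st : List (List String) × List String) (w : String) :
    List (List String) × List String :=
  if w = "<s>" ∧ st.2 ≠ [] then (st.1 ++ [st.2], [w]) else (st.1, st.2 ++ [w])

-- Stage-2 body: bigrams within one segment (zip with its tail, join with a space)
def generate_bigrams_alt_seg (seg : List String) : List String :=
  (seg.zip seg.tail).map (fun p => p.1 ++ " " ++ p.2)

def generate_bigrams_alt (data : List String) : List String × Int :=
  let st := data.foldl generate_bigrams_alt_split ([], [])
  let segments := if st.2 ≠ [] then st.1 ++ [st.2] else st.1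
  let bigrams := segments.flatMap generate_bigrams_alt_seg
  (bigrams, (bigrams.length : Int))

-- ===== PRECONDITION & SPEC =====
def Spec_generate_bigrams (data : List String) (out : List String × Int) : Prop := out = generate_bigrams_alt data
instance (data : List String) (out : List String × Int) : Decidable (Spec_generate_bigrams data out) := by unfold Spec_generate_bigrams; infer_instance

-- ===== CLAIM (what is proved, stated in full; the proofs are below) =====
def Claim_equal_generate_bigrams : Prop := ∀ (data : List String), Dom_generate_bigrams data → Spec_generate_bigrams data (generate_bigrams data)

-- ===== LEMMAS AND PROOFS =====

-- canonical description of the bigrams emitted from remaining list l with previous word p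
def pvBigrams (p : String) (l : List String) : List String :=
  (((p :: l).zip l).filter (fun q => q.2 ≠ "<s>")).map (fun q => q.1 ++ " " ++ q.2)

theorem generate_bigrams_loop (l : List String) :
    ∀ (p : String) (acc : List String) (t : Int),
      l.foldl generate_bigrams_step (acc, t, some p)
        = (acc ++ pvBigrams p l, t + (pvBigrams p l).length, some ((p :: l).getLast (by simp))) := by
  induction l with
  | nil => intro p acc t; simp [pvBigrams]
  | cons cur l' ih =>
      intro p acc t
      by_cases h : cur = "<s>"
      · subst h
        rw [List.foldl_cons]
        simp only [generate_bigrams_step, ne_eq, not_true_eq_false, if_false]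
        rw [ih]
        simp [pvBigrams, List.getLast_cons]
      · simp [List.foldl, generate_bigrams_step, h, ih cur, pvBigrams,
          List.getLast_cons]
        omega

theorem seg_append_last (cur : List String) (w : String) (h : cur ≠ []) :
    generate_bigrams_alt_seg (cur ++ [w])
      = generate_bigrams_alt_seg cur ++ [cur.getLastD "" ++ " " ++ w] := by
  induction cur with
  | nil => simp at h
  | cons a rest ih =>
      cases rest with
      | nil => simp [generate_bigrams_alt_seg]
      | cons b rest' =>
          have ih' := ih (by simp)
          simp only [generate_bigrams_alt_seg, List.cons_append, List.tail_cons,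
            List.zip_cons_cons, List.map_cons, List.getLastD_cons] at ih' ⊢
          rw [ih']

theorem generate_bigrams_alt_loop (l : List String) :
    ∀ (segs : List (List String)) (cur : List String), cur ≠ [] →
      (l.foldl generate_bigrams_alt_split (segs, cur)).2 ≠ [] ∧
      ((l.foldl generate_bigrams_alt_split (segs, cur)).1
          ++ [(l.foldl generate_bigrams_alt_split (segs, cur)).2]).flatMap generate_bigrams_alt_seg
        = (segs ++ [cur]).flatMap generate_bigrams_alt_seg ++ pvBigrams (cur.getLastD "") l := by
  induction l with
  | nil => intro segs cur h; exact ⟨h, by simp [pvBigrams]⟩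
  | cons w rest ih =>
      intro segs cur h
      by_cases hw : w = "<s>"
      · subst hw
        rw [List.foldl_cons,
          show generate_bigrams_alt_split (segs, cur) "<s>" = (segs ++ [cur], ["<s>"]) from by
            simp [generate_bigrams_alt_split, h]]
        obtain ⟨h1, h2⟩ := ih (segs ++ [cur]) ["<s>"] (by simp)
        refine ⟨h1, ?_⟩
        rw [h2]
        simp [generate_bigrams_alt_seg, pvBigrams]
      · rw [List.foldl_cons,
          show generate_bigrams_alt_split (segs, cur) w = (segs, cur ++ [w]) from by
            simp [generate_bigrams_alt_split, hw]]
        obtain ⟨h1, h2⟩ := ih segs (cur ++ [w]) (by simp)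
        refine ⟨h1, ?_⟩
        rw [h2]
        simp [List.flatMap_append, seg_append_last cur w h, pvBigrams, hw]

theorem generate_bigrams_eq (data : List String) :
    generate_bigrams data = generate_bigrams_alt data := by
  cases data with
  | nil => rfl
  | cons h l =>
      obtain ⟨h1, h2⟩ := generate_bigrams_alt_loop l [] [h] (by simp)
      rw [show ([] : List (List String)) ++ [[h]] = [[h]] from by simp,
        show ([h].getLastD "") = h from rfl,
        show (([[h]] : List (List String))).flatMap generate_bigrams_alt_seg ++ pvBigrams h l
            = pvBigrams h l from by simp [generate_bigrams_alt_seg]] at h2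
      simp only [generate_bigrams, generate_bigrams_alt, List.foldl_cons]
      rw [show generate_bigrams_alt_split ([], []) h = ([], [h]) from by
            simp [generate_bigrams_alt_split],
        show generate_bigrams_step ([], 0, none) h = ([], 0, some h) from rfl,
        generate_bigrams_loop l h [] 0, if_pos h1, h2]
      simp

-- ===== VERDICT (by name: the statement is the Claim_ definition above) =====
theorem generate_bigrams_spec : Claim_equal_generate_bigrams := by
  intro data _
  exact generate_bigrams_eq data
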